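-- pv_equiv track=rewrite | github.com/schabusflorian-ui/TabIntelligence | src/db/crud.py | _build_line_item_index
-- ===== SOURCE A (Python) =====
-- def _build_line_item_index(line_items: list) -> dict:
--     """Build a lookup index from line_items for O(1) matching by original_label.
--
--     Returns dict mapping original_label -> list of (index, item) tuples.
--     """
--     from collections import defaultdict
--
--     index = defaultdict(list)
--     for idx, item in enumerate(line_items):
--         label = item.get("original_label")
--         if label:
--             index[label].append((idx, item))
--     return dict(index)
-- ===== SOURCE B (Python) =====
-- def _build_line_item_index(line_items: list) -> dict:
--     """Build a lookup index: original_label -> list of (index, item) tuples.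
--
--     Two-pass shape: first collect the distinct truthy labels in first-occurrence
--     order, then build each label's group by filtering the enumerated items.
--     """
--     labels = []
--     for item in line_items:
--         lab = item.get("original_label")
--         if lab and lab not in labels:
--             labels.append(lab)
--     return {lab: [(i, it) for i, it in enumerate(line_items)
--                   if it.get("original_label") == lab]
--             for lab in labels}
-- ===== Notes on version B (the rewrite author's own statement) =====
-- stated objective: alternative
-- what changed: Replaces A's single scatter pass into a defaultdict with a two-pass decomposition: collect distinct truthy labels in first-occurrence order, then build each label's group by filtering the enumerated list.
import Mathlib
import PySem

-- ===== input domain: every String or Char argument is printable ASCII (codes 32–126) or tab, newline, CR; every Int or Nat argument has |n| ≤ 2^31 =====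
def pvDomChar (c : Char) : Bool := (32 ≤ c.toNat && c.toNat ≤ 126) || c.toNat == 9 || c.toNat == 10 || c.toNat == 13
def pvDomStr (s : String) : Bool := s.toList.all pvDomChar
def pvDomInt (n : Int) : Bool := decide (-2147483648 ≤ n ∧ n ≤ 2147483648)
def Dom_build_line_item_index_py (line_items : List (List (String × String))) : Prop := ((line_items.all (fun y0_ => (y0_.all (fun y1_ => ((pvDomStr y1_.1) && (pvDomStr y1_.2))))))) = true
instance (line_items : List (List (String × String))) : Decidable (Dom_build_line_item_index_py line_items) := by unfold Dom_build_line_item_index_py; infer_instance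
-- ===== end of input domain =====

-- B replaces A's single scatter pass into a defaultdict by a two-pass decomposition
-- (distinct labels first, then one filter per label); objective: alternative, not faster.

-- ===== PORT A =====
def build_line_item_index_py (line_items : List (List (String × String))) : List (String × List (Int × (List (String × String)))) :=
  ((PySem.List.enumerate line_items 0).foldl
    (fun (d : PySem.Dict String (List (Int × List (String × String)))) p =>
      match (PySem.Dict.mk p.2).get? "original_label" with
      | some lab => if lab = "" then d else d.modify lab [] (fun l => l ++ [p])
      | none => d)
    PySem.Dict.empty).items

-- ===== PORT B =====
def build_line_item_index_py_alt (line_items : List (List (String × String))) : List (String × List (Int × (List (String × String)))) :=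
  let labels := line_items.foldl
    (fun (labs : List String) it =>
      match (PySem.Dict.mk it).get? "original_label" with
      | some lab => if lab ≠ "" ∧ lab ∉ labs then labs ++ [lab] else labs
      | none => labs) []
  labels.map (fun lab =>
    (lab, (PySem.List.enumerate line_items 0).filter
        (fun p => (PySem.Dict.mk p.2).get? "original_label" == some lab)))

-- ===== PRECONDITION & SPEC =====
def Spec_build_line_item_index_py (line_items : List (List (String × String))) (out : List (String × List (Int × (List (String × String))))) : Prop := out = build_line_item_index_py_alt line_items
instance (line_items : List (List (String × String))) (out : List (String × List (Int × (List (String × String))))) : Decidable (Spec_build_line_item_index_py line_items out) := by unfold Spec_build_line_item_index_py; infer_instance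

-- ===== CLAIM (what is proved, stated in full; the proofs are below) =====
def Claim_equal_build_line_item_index_py : Prop := ∀ (line_items : List (List (String × String))), Dom_build_line_item_index_py line_items → Spec_build_line_item_index_py line_items (build_line_item_index_py line_items)

-- ===== LEMMAS AND PROOFS =====

-- the (label, (idx, item)) pairs A's loop actually inserts
def pvPair (p : Int × List (String × String)) : Option (String × (Int × List (String × String))) :=
  match (PySem.Dict.mk p.2).get? "original_label" with
  | some lab => if lab = "" then none else some (lab, p)
  | none => none

def pvLab (it : List (String × String)) : Option String :=
  match (PySem.Dict.mk it).get? "original_label" with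
  | some lab => if lab = "" then none else some lab
  | none => none

theorem pvPair_none (p : Int × List (String × String))
    (h : (PySem.Dict.mk p.2).get? "original_label" = none) : pvPair p = none := by
  simp [pvPair, h]

theorem pvPair_empty (p : Int × List (String × String)) (lab : String)
    (h : (PySem.Dict.mk p.2).get? "original_label" = some lab) (he : lab = "") :
    pvPair p = none := by simp [pvPair, h, he]

theorem pvPair_some (p : Int × List (String × String)) (lab : String)
    (h : (PySem.Dict.mk p.2).get? "original_label" = some lab) (he : ¬ lab = "") :
    pvPair p = some (lab, p) := by simp [pvPair, h, he]

theorem pvLab_none (it : List (String × String))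
    (h : (PySem.Dict.mk it).get? "original_label" = none) : pvLab it = none := by
  simp [pvLab, h]

theorem pvLab_empty (it : List (String × String)) (lab : String)
    (h : (PySem.Dict.mk it).get? "original_label" = some lab) (he : lab = "") :
    pvLab it = none := by simp [pvLab, h, he]

theorem pvLab_some (it : List (String × String)) (lab : String)
    (h : (PySem.Dict.mk it).get? "original_label" = some lab) (he : ¬ lab = "") :
    pvLab it = some lab := by simp [pvLab, h, he]

-- A's fold is the grouping fold over the filtered pairs
theorem pvFoldA (l : List (Int × List (String × String)))
    (d : PySem.Dict String (List (Int × List (String × String)))) :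
    l.foldl (fun d p =>
        match (PySem.Dict.mk p.2).get? "original_label" with
        | some lab => if lab = "" then d else d.modify lab [] (fun l => l ++ [p])
        | none => d) d
    = (l.filterMap pvPair).foldl (fun d q => d.modify q.1 [] (fun l => l ++ [q.2])) d := by
  induction l generalizing d with
  | nil => rfl
  | cons p l ih =>
    simp only [List.foldl_cons, List.filterMap_cons]
    cases h : (PySem.Dict.mk p.2).get? "original_label" with
    | none => rw [pvPair_none p h]; simp only [h]; exact ih d
    | some lab =>
      by_cases he : lab = ""
      · rw [pvPair_empty p lab h he]; simp only [h, he, if_pos rfl]; exact ih d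
      · rw [pvPair_some p lab h he]; simp only [h, if_neg he]; exact ih _

-- B's first pass computes the deduped label sequence
theorem pvFoldB (l : List (List (String × String))) (labs : List String) :
    l.foldl (fun (labs : List String) it =>
        match (PySem.Dict.mk it).get? "original_label" with
        | some lab => if lab ≠ "" ∧ lab ∉ labs then labs ++ [lab] else labs
        | none => labs) labs
    = PySem.Set.update labs (l.filterMap pvLab) := by
  induction l generalizing labs with
  | nil => simp [PySem.Set.update_nil]
  | cons it l ih =>
    simp only [List.foldl_cons, List.filterMap_cons]
    cases h : (PySem.Dict.mk it).get? "original_label" with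
    | none => rw [pvLab_none it h]; simp only [h]; exact ih labs
    | some lab =>
      by_cases he : lab = ""
      · rw [pvLab_empty it lab h he]; simp only [h, he]
        simpa using ih labs
      · rw [pvLab_some it lab h he, PySem.Set.update_cons]
        simp only [h]
        by_cases hm : lab ∈ labs
        · rw [if_neg (by simp [hm]), PySem.Set.add_of_mem hm]; exact ih labs
        · rw [if_pos ⟨he, hm⟩, PySem.Set.add_of_not_mem hm]; exact ih _

-- the labels of the filtered pairs are the filtered labels
theorem pvMapFst (l : List (Int × List (String × String))) :
    (l.filterMap pvPair).map (·.1) = l.filterMap (fun p => pvLab p.2) := by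
  induction l with
  | nil => rfl
  | cons p l ih =>
    simp only [List.filterMap_cons]
    cases h : (PySem.Dict.mk p.2).get? "original_label" with
    | none => rw [pvPair_none p h, pvLab_none p.2 h]; exact ih
    | some lab =>
      by_cases he : lab = ""
      · rw [pvPair_empty p lab h he, pvLab_empty p.2 lab h he]; exact ih
      · rw [pvPair_some p lab h he, pvLab_some p.2 lab h he]; simp [ih]

theorem pvLabEnum (l : List (List (String × String))) (s : Int) :
    (PySem.List.enumerate l s).filterMap (fun p => pvLab p.2) = l.filterMap pvLab := by
  induction l generalizing s with
  | nil => rfl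
  | cons it l ih =>
    rw [PySem.List.enumerate_cons]
    simp only [List.filterMap_cons]
    cases h : pvLab it <;> simp [h, ih]

-- every collected label is nonempty
theorem pvLabNe (l : List (List (String × String))) (lab : String)
    (h : lab ∈ l.filterMap pvLab) : lab ≠ "" := by
  rw [List.mem_filterMap] at h
  obtain ⟨it, _, hit⟩ := h
  unfold pvLab at hit
  cases hg : (PySem.Dict.mk it).get? "original_label" with
  | none => rw [hg] at hit; simp at hit
  | some lab' =>
    rw [hg] at hit
    by_cases he : lab' = ""
    · simp [he] at hit
    · simp [he] at hit
      rw [← hit]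
      exact he

-- a group, read off from the filtered pairs, is B's filter of the enumeration
theorem pvGroup (l : List (Int × List (String × String))) (lab : String) (hne : lab ≠ "") :
    ((l.filterMap pvPair).filter (fun q => q.1 == lab)).map (·.2)
    = l.filter (fun p => (PySem.Dict.mk p.2).get? "original_label" == some lab) := by
  induction l with
  | nil => rfl
  | cons p l ih =>
    simp only [List.filterMap_cons, List.filter_cons]
    cases h : (PySem.Dict.mk p.2).get? "original_label" with
    | none => rw [pvPair_none p h]; simp only [h]; simpa using ih
    | some lab' =>
      by_cases hl : lab' = lab
      · have he : ¬ lab' = "" := by rw [hl]; exact hne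
        rw [pvPair_some p lab' h he]
        subst hl
        simp [List.filter_cons, h, ih]
      · have h2 : ((some lab' == some lab) = false) := beq_eq_false_iff_ne.2 (by simpa using hl)
        have h1 : ((lab' == lab) = false) := beq_eq_false_iff_ne.2 hl
        by_cases he : lab' = ""
        · rw [pvPair_empty p lab' h he]
          simp [h2, ih]
        · rw [pvPair_some p lab' h he]
          simp [h1, h2, ih]

-- ===== VERDICT (by name: the statement is the Claim_ definition above) =====
theorem build_line_item_index_py_spec : Claim_equal_build_line_item_index_py := by
  intro line_items _
  unfold Spec_build_line_item_index_py build_line_item_index_py build_line_item_index_py_alt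
  rw [pvFoldA, pvFoldB, PySem.Set.update_nil_left]
  set pairs := (PySem.List.enumerate line_items 0).filterMap pvPair with hp
  have hnd : ((pairs.foldl (fun d q => d.modify q.1 [] (fun l => l ++ [q.2])) PySem.Dict.empty)).keys.Nodup :=
    PySem.Dict.nodup_keys_foldl_modify_key pairs (·.1) [] (fun d q l => l ++ [q.2]) PySem.Dict.empty (by simp)
  rw [PySem.Dict.items_eq_map_keys _ hnd []]
  have hkeys : ((pairs.foldl (fun d q => d.modify q.1 [] (fun l => l ++ [q.2])) PySem.Dict.empty)).keys
      = PySem.Set.ofList (pairs.map (·.1)) := by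
    have := PySem.Dict.keys_foldl_modify_key (l := pairs) (key := (·.1)) (d0 := []) (f := fun d q l => l ++ [q.2]) (d := PySem.Dict.empty)
    simpa [PySem.Set.update_nil_left] using this
  rw [hkeys, pvMapFst, pvLabEnum]
  apply List.map_congr_left
  intro lab hmem
  have hlab : lab ∈ line_items.filterMap pvLab := (PySem.Set.mem_ofList _ _).1 hmem
  have hne := pvLabNe _ _ hlab
  have hgd := PySem.Dict.getD_foldl_modify_append (l := pairs) (d := PySem.Dict.empty) (c := lab)
  rw [hgd, PySem.Dict.getD_empty]
  simpa using pvGroup ((PySem.List.enumerate line_items 0)) lab hne
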